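-- pv_equiv track=rewrite | github.com/mounikayacham/solvedProblems | Difficulty: Easy/String Rotated by 2 Places/string-rotated-by-2-places.py | isRotated
-- ===== SOURCE A (Python) =====
-- def isRotated(s1,s2):
--     #code here
--     if len(s1)!=len(s2):
--         return False
--     n=len(s1)
--     cl=True
--     an=True
--     for i in range(n):
--         if (s1[i]!=s2[(i+2)%n]):
--             cl=False
--             break
--     for j in range(n):
--         if (s1[(j+2)%n]!=s2[j]):
--             an=False
--             break
--     return cl or an
-- ===== SOURCE B (Python) =====
-- def isRotated(s1, s2):
--     if len(s1) != len(s2):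
--         return False
--     return s1 == s2[2:] + s2[:2] or s2 == s1[2:] + s1[:2]
-- ===== Notes on version B (the rewrite author's own statement) =====
-- stated objective: idiomatic
-- what changed: Replaces A's two index/modulo element-wise scan loops with early break by whole-string slice-and-compare of the two rotations (s2[2:]+s2[:2] and s1[2:]+s1[:2]).
import Mathlib
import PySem

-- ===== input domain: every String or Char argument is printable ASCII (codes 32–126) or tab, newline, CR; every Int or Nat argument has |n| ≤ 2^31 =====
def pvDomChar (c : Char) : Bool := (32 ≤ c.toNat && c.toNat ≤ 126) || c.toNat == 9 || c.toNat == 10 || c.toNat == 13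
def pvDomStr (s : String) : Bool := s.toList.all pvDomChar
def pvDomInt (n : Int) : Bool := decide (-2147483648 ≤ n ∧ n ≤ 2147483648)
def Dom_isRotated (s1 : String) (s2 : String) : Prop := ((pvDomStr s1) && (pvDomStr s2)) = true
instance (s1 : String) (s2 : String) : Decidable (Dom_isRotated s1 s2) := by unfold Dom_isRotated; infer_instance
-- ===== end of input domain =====

-- B replaces A's two index/modulo loops by whole-string slice-and-compare (idiomatic; same cost).

-- ===== PORT A =====
-- first for-loop of A: on mismatch set cl=False and break (return false); indexing is
-- exact because every i in range(n) and (i+2)%n are < n = length (Python raises nowhere here)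
def clLoop (l1 l2 : List Char) (n : Nat) : List Nat → Bool
  | [] => true
  | i :: rest => if l1.getD i ' ' ≠ l2.getD ((i + 2) % n) ' ' then false else clLoop l1 l2 n rest

-- second for-loop of A, same shape
def anLoop (l1 l2 : List Char) (n : Nat) : List Nat → Bool
  | [] => true
  | j :: rest => if l1.getD ((j + 2) % n) ' ' ≠ l2.getD j ' ' then false else anLoop l1 l2 n rest

def isRotated (s1 : String) (s2 : String) : Bool :=
  if s1.toList.length ≠ s2.toList.length then false
  else
    let n := s1.toList.length
    let cl := clLoop s1.toList s2.toList n (List.range n)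
    let an := anLoop s1.toList s2.toList n (List.range n)
    cl || an

-- ===== PORT B =====
-- s[2:] = PySem.List.slice s (some 2) none, s[:2] = PySem.List.slice s none (some 2)
def isRotated_alt (s1 : String) (s2 : String) : Bool :=
  if s1.toList.length ≠ s2.toList.length then false
  else
    (s1.toList == PySem.List.slice s2.toList (some 2) none ++ PySem.List.slice s2.toList none (some 2))
    || (s2.toList == PySem.List.slice s1.toList (some 2) none ++ PySem.List.slice s1.toList none (some 2))

-- ===== PRECONDITION & SPEC =====
def Spec_isRotated (s1 : String) (s2 : String) (out : Bool) : Prop := out = isRotated_alt s1 s2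
instance (s1 : String) (s2 : String) (out : Bool) : Decidable (Spec_isRotated s1 s2 out) := by unfold Spec_isRotated; infer_instance

-- ===== CLAIM (what is proved, stated in full; the proofs are below) =====
def Claim_equal_isRotated : Prop := ∀ (s1 : String) (s2 : String), Dom_isRotated s1 s2 → Spec_isRotated s1 s2 (isRotated s1 s2)

-- ===== LEMMAS AND PROOFS =====

theorem clLoop_eq_all (l1 l2 : List Char) (n : Nat) (is : List Nat) :
    clLoop l1 l2 n is = is.all (fun i => decide (l1.getD i ' ' = l2.getD ((i + 2) % n) ' ')) := by
  induction is with
  | nil => rfl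
  | cons i rest ih => by_cases h : l1.getD i ' ' = l2.getD ((i + 2) % n) ' ' <;>
      simp [clLoop, ih]

theorem anLoop_eq_all (l1 l2 : List Char) (n : Nat) (is : List Nat) :
    anLoop l1 l2 n is = is.all (fun j => decide (l1.getD ((j + 2) % n) ' ' = l2.getD j ' ')) := by
  induction is with
  | nil => rfl
  | cons j rest ih => by_cases h : l1.getD ((j + 2) % n) ' ' = l2.getD j ' ' <;>
      simp [anLoop, ih]

-- pointwise description of the rotation-by-2 built from slices
theorem rot2_getD (l : List Char) (i : Nat) (h : i < l.length) :
    (l.drop 2 ++ l.take 2).getD i ' ' = l.getD ((i + 2) % l.length) ' ' := by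
  by_cases h2 : i + 2 < l.length
  · rw [Nat.mod_eq_of_lt h2]
    rw [List.getD_append _ _ _ _ (by simp; omega)]
    rw [List.getD_eq_getElem _ _ (by simp; omega), List.getD_eq_getElem _ _ (by omega)]
    simp [Nat.add_comm]
  · have hmod : (i + 2) % l.length = i - (l.length - 2) := by
      rcases Nat.lt_or_ge l.length 2 with hn | hn
      · interval_cases hl : l.length <;> omega
      · have : i + 2 - l.length < l.length := by omega
        rw [Nat.mod_eq_sub_mod (by omega), Nat.mod_eq_of_lt this]; omega
    rw [hmod]
    rw [List.getD_append_right _ _ _ _ (by simp; omega)]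
    have hlt : i - (l.drop 2).length < (l.take 2).length := by simp; omega
    rw [List.getD_eq_getElem _ _ hlt, List.getD_eq_getElem _ _ (by omega)]
    simp

theorem rot2_eq_iff (l1 l2 : List Char) (h : l1.length = l2.length) :
    (l1 = l2.drop 2 ++ l2.take 2) ↔
      ∀ i < l1.length, l1.getD i ' ' = l2.getD ((i + 2) % l2.length) ' ' := by
  constructor
  · intro he i hi
    rw [he, rot2_getD l2 i (by omega)]
  · intro hp
    apply List.ext_getElem (by simp; omega)
    intro i hi1 hi2
    calc l1[i] = l1.getD i ' ' := (List.getD_eq_getElem _ _ hi1).symm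
      _ = l2.getD ((i + 2) % l2.length) ' ' := hp i hi1
      _ = (l2.drop 2 ++ l2.take 2).getD i ' ' := (rot2_getD l2 i (by omega)).symm
      _ = _ := List.getD_eq_getElem _ _ hi2

-- one side of the verdict: loop-all equals slice-and-compare
theorem loop_eq_beq (l1 l2 : List Char) (h : l1.length = l2.length) :
    (List.range l1.length).all
        (fun i => decide (l1.getD i ' ' = l2.getD ((i + 2) % l1.length) ' '))
      = (l1 == l2.drop 2 ++ l2.take 2) := by
  cases hb : (l1 == l2.drop 2 ++ l2.take 2) with
  | true =>
    rw [List.all_eq_true]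
    intro i hi
    have := (rot2_eq_iff l1 l2 h).1 (by simpa using hb) i (List.mem_range.mp hi)
    rw [← h] at this
    exact decide_eq_true this
  | false =>
    by_contra hc
    have hall : (List.range l1.length).all
        (fun i => decide (l1.getD i ' ' = l2.getD ((i + 2) % l1.length) ' ')) = true := by
      revert hc; cases (List.range l1.length).all
        (fun i => decide (l1.getD i ' ' = l2.getD ((i + 2) % l1.length) ' ')) <;> simp
    rw [List.all_eq_true] at hall
    have : l1 = l2.drop 2 ++ l2.take 2 := by
      apply (rot2_eq_iff l1 l2 h).2
      intro i hi
      have := hall i (List.mem_range.mpr hi)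
      rw [← h]
      exact of_decide_eq_true this
    simp [this] at hb

-- ===== VERDICT (by name: the statement is the Claim_ definition above) =====
theorem isRotated_spec : Claim_equal_isRotated := by
  intro s1 s2 _
  unfold Spec_isRotated isRotated isRotated_alt
  by_cases hne : s1.toList.length ≠ s2.toList.length
  · rw [if_pos hne, if_pos hne]
  · have hlen : s1.toList.length = s2.toList.length := not_ne_iff.mp hne
    rw [if_neg hne, if_neg hne]
    have edrop : ∀ l : List Char, PySem.List.slice l (some 2) none = l.drop 2 := by
      intro l; simp [pysem]
    have etake : ∀ l : List Char, PySem.List.slice l none (some 2) = l.take 2 := by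
      intro l; simp [pysem]
    rw [edrop, etake, edrop, etake]
    show (clLoop s1.toList s2.toList s1.toList.length (List.range s1.toList.length) ||
          anLoop s1.toList s2.toList s1.toList.length (List.range s1.toList.length)) = _
    congr 1
    · rw [clLoop_eq_all]
      exact loop_eq_beq s1.toList s2.toList hlen
    · rw [anLoop_eq_all]
      have := loop_eq_beq s2.toList s1.toList hlen.symm
      rw [← this, hlen]
      congr 1
      funext j
      exact decide_eq_decide.mpr eq_comm
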